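-- pv_equiv track=rewrite | github.com/umrlastig/tracklib | tracklib/core/utils.py | compLike
-- ===== SOURCE A (Python) =====
-- def compLike(s1, s2) -> bool:
--     """LIKE comparisons.
--
--     Examples:
--         compLike("3", "['1234', '4567', '9090']")
--         compLike("abcdefg", "%bcd")
--
--     :param s1: TODO
--     :param s2: TODO
--     :return: TODO
--     """
--     tokens = s2.split("%")
--     if len(tokens) == 1:
--         return s1 in s2  # 'in' ('equal' yet to be decided)
--     occ = []
--     s = s1
--     for tok in tokens:
--         id = s.find(tok)
--         if id < 0:
--             return False
--         occ.append(id)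
--         s = s[id + len(tok) : len(s)]
--     return True
-- ===== SOURCE B (Python) =====
-- def compLike(s1, s2) -> bool:
--     """LIKE comparison: the '%'-separated tokens of s2 must occur in order,
--     disjointly, in s1; with no '%' it falls back to `s1 in s2` as the original.
--     Uses a single explicit cursor into s1 advanced with startswith tests,
--     instead of the original's find-and-slice loop (no slicing, no occ list)."""
--     tokens = s2.split("%")
--     if len(tokens) == 1:
--         return s1 in s2
--     i = 0
--     for tok in tokens:
--         while True:
--             if i + len(tok) > len(s1):
--                 return False
--             if s1.startswith(tok, i):
--                 break
--             i += 1
--         i += len(tok)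
--     return True
-- ===== Notes on version B (the rewrite author's own statement) =====
-- stated objective: alternative
-- what changed: Replaces the find-and-slice fold (which rebuilds the remaining string and accumulates an occurrence list at each token) with a single integer cursor into the unchanged s1, advanced by startswith tests until each token matches, so no slices and no occurrence list are ever built.
import Mathlib
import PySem

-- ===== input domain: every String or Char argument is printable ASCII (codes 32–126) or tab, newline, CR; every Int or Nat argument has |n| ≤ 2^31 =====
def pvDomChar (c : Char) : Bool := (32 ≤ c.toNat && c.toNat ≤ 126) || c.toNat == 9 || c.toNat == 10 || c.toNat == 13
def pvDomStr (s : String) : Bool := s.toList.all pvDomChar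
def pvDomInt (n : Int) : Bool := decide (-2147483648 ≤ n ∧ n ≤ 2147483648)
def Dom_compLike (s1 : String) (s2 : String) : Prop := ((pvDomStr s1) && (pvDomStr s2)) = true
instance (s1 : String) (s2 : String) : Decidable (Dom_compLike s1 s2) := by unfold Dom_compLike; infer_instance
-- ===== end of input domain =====

-- B replaces A's find-and-slice loop (which rebuilds the remaining string and an
-- occurrence list at each step) by a single integer cursor into s1 advanced with
-- startswith tests (alternative decomposition, same cost).

-- ===== PORT A =====
-- the 'for tok in tokens' loop: occ is the occurrence list A builds (never read), s the remaining string
def pvGoA (s : List Char) (occ : List Int) : List (List Char) → Bool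
  | [] => true
  | t :: ts =>
    let id := PySem.Chars.find s t
    if id < 0 then false
    else pvGoA (PySem.List.slice s (some (id + t.length)) (some (s.length : Int))) (occ ++ [id]) ts

def compLike (s1 : String) (s2 : String) : Bool :=
  let tokens := PySem.Chars.splitOn s2.toList ['%']
  if tokens.length == 1 then PySem.Chars.isIn s1.toList s2.toList
  else pvGoA s1.toList [] tokens

-- ===== PORT B =====
-- the inner 'while True' loop of Source B: advance cursor i until the token starts at i
-- (none = the 'return False' exit); s1.startswith(tok, i) is exactly
-- startswith (s.drop i) tok for 0 ≤ i, which is the only way Source B calls it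
def pvScanB (s t : List Char) (i : Nat) : Option Nat :=
  if i + t.length > s.length then none
  else if PySem.Chars.startswith (s.drop i) t then some i
  else pvScanB s t (i + 1)
termination_by s.length + 1 - i
decreasing_by omega

-- the 'for tok in tokens' loop of Source B, carrying the cursor i
def pvGoB (s : List Char) : List (List Char) → Nat → Bool
  | [], _ => true
  | t :: ts, i =>
    match pvScanB s t i with
    | none => false
    | some j => pvGoB s ts (j + t.length)

def compLike_alt (s1 : String) (s2 : String) : Bool :=
  let tokens := PySem.Chars.splitOn s2.toList ['%']
  if tokens.length == 1 then PySem.Chars.isIn s1.toList s2.toList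
  else pvGoB s1.toList tokens 0

-- ===== PRECONDITION & SPEC =====
def Spec_compLike (s1 : String) (s2 : String) (out : Bool) : Prop := out = compLike_alt s1 s2
instance (s1 : String) (s2 : String) (out : Bool) : Decidable (Spec_compLike s1 s2 out) := by unfold Spec_compLike; infer_instance

-- ===== CLAIM (what is proved, stated in full; the proofs are below) =====
def Claim_equal_compLike : Prop := ∀ (s1 : String) (s2 : String), Dom_compLike s1 s2 → Spec_compLike s1 s2 (compLike s1 s2)

-- ===== LEMMAS AND PROOFS =====

-- "the tokens occur, in order and disjointly, in s"
def pvEx : List Char → List (List Char) → Prop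
  | _, [] => True
  | s, t :: ts => ∃ j : Nat, t <+: s.drop j ∧ pvEx (s.drop (j + t.length)) ts

lemma pvEx_drop (s : List Char) (ts : List (List Char)) (k : Nat)
    (h : pvEx (s.drop k) ts) : pvEx s ts := by
  cases ts with
  | nil => trivial
  | cons t ts =>
    obtain ⟨j, hp, he⟩ := h
    refine ⟨k + j, ?_, ?_⟩
    · rwa [List.drop_drop] at hp
    · have harith : k + j + t.length = k + (j + t.length) := by omega
      rw [harith, ← List.drop_drop]
      exact he

lemma pvGoA_iff : ∀ (toks : List (List Char)) (s : List Char) (occ : List Int),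
    (pvGoA s occ toks = true ↔ pvEx s toks) := by
  intro toks
  induction toks with
  | nil => intro s occ; simp [pvGoA, pvEx]
  | cons t ts ih =>
    intro s occ
    simp only [pvGoA]
    by_cases hneg : PySem.Chars.find s t < 0
    · rw [if_pos hneg]
      simp only [Bool.false_eq_true, false_iff]
      rintro ⟨j, hp, _⟩
      have hinf : t <:+: s :=
        (PySem.Chars.isIn_iff_infix t s).mp ((PySem.Chars.exists_prefix_drop_iff_isIn t s).mp ⟨j, hp⟩)
      have := (PySem.Chars.find_nonneg_iff s t).mpr hinf
      omega
    · rw [if_neg hneg]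
      push Not at hneg
      obtain ⟨hpref, hmin⟩ := PySem.Chars.find_spec hneg
      have hle := PySem.Chars.find_le_length s t
      have hslice : PySem.List.slice s (some (PySem.Chars.find s t + (t.length : Int)))
          (some (s.length : Int)) = s.drop ((PySem.Chars.find s t).toNat + t.length) := by
        rw [PySem.List.slice_toNat s (by omega) (by omega)]
        have h2 : (PySem.Chars.find s t + (t.length : Int)).toNat
            = (PySem.Chars.find s t).toNat + t.length := by omega
        rw [h2]
        apply List.take_of_length_le
        simp only [List.length_drop, Int.toNat_natCast]
        omega
      rw [hslice, ih]
      constructor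
      · intro h
        exact ⟨(PySem.Chars.find s t).toNat, hpref, h⟩
      · rintro ⟨j, hp, he⟩
        have hjr : (PySem.Chars.find s t).toNat ≤ j := by
          by_contra hlt
          push Not at hlt
          exact hmin j hlt hp
        apply pvEx_drop _ ts (j - (PySem.Chars.find s t).toNat)
        rw [List.drop_drop]
        have harith : (PySem.Chars.find s t).toNat + t.length + (j - (PySem.Chars.find s t).toNat)
            = j + t.length := by omega
        rw [harith]
        exact he

-- full characterisation of the cursor scan (fuel-style induction on s.length + 1 - i)
lemma pvScanB_cases_fuel : ∀ (n : Nat) (s t : List Char) (i : Nat),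
    s.length + 1 - i ≤ n → i ≤ s.length →
    (pvScanB s t i = none ∧ ∀ j, i ≤ j → ¬ t <+: s.drop j) ∨
    (∃ r, pvScanB s t i = some r ∧ i ≤ r ∧ r + t.length ≤ s.length ∧ t <+: s.drop r ∧
      ∀ k, i ≤ k → k < r → ¬ t <+: s.drop k) := by
  intro n
  induction n with
  | zero =>
    intro s t i h hi
    omega
  | succ n ih =>
    intro s t i hfuel hi
    rw [pvScanB]
    by_cases hlen : i + t.length > s.length
    · rw [if_pos hlen]
      left
      refine ⟨rfl, fun j hj hp => ?_⟩
      have : t.length ≤ s.length - j := by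
        have := hp.length_le
        simpa using this
      by_cases hj' : j ≤ s.length
      · omega
      · have hd : s.drop j = [] := List.drop_eq_nil_of_le (by omega)
        rw [hd, List.prefix_nil] at hp
        subst hp
        simp only [List.length_nil] at hlen
        omega
    · rw [if_neg hlen]
      by_cases hsw : PySem.Chars.startswith (s.drop i) t = true
      · rw [if_pos hsw]
        right
        exact ⟨i, rfl, le_refl _, by omega, (PySem.Chars.startswith_iff _ _).mp hsw,
          fun k h1 h2 => by omega⟩
      · rw [if_neg hsw]
        have hnp : ¬ t <+: s.drop i := fun hp =>
          hsw ((PySem.Chars.startswith_iff _ _).mpr hp)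
        have htlen : 1 ≤ t.length := by
          by_contra hc
          have ht : t = [] := List.eq_nil_of_length_eq_zero (by omega)
          exact hnp (ht ▸ List.nil_prefix)
        rcases ih s t (i + 1) (by omega) (by omega) with ⟨h1, h2⟩ | ⟨r, h1, h2, h3, h4, h5⟩
        · left
          refine ⟨h1, fun j hj hp => ?_⟩
          by_cases hji : i = j
          · subst hji; exact hnp hp
          · exact h2 j (by omega) hp
        · right
          refine ⟨r, h1, by omega, h3, h4, fun k hk1 hk2 => ?_⟩
          by_cases hki : i = k
          · subst hki; exact hnp
          · exact h5 k (by omega) hk2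

lemma pvScanB_cases (s t : List Char) (i : Nat) (hi : i ≤ s.length) :
    (pvScanB s t i = none ∧ ∀ j, i ≤ j → ¬ t <+: s.drop j) ∨
    (∃ r, pvScanB s t i = some r ∧ i ≤ r ∧ r + t.length ≤ s.length ∧ t <+: s.drop r ∧
      ∀ k, i ≤ k → k < r → ¬ t <+: s.drop k) :=
  pvScanB_cases_fuel (s.length + 1 - i) s t i (le_refl _) hi

lemma pvGoB_iff : ∀ (toks : List (List Char)) (s : List Char) (i : Nat), i ≤ s.length →
    (pvGoB s toks i = true ↔ pvEx (s.drop i) toks) := by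
  intro toks
  induction toks with
  | nil => intro s i _; simp [pvGoB, pvEx]
  | cons t ts ih =>
    intro s i hi
    simp only [pvGoB]
    rcases pvScanB_cases s t i hi with ⟨h1, h2⟩ | ⟨r, h1, h2, h3, h4, h5⟩
    · rw [h1]
      simp only [Bool.false_eq_true, false_iff]
      rintro ⟨j, hp, _⟩
      rw [List.drop_drop] at hp
      exact h2 (i + j) (by omega) hp
    · rw [h1]
      simp only []
      rw [ih s (r + t.length) (by omega)]
      constructor
      · intro h
        refine ⟨r - i, ?_, ?_⟩
        · rw [List.drop_drop]
          have : i + (r - i) = r := by omega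
          rw [this]; exact h4
        · rw [List.drop_drop]
          have : i + (r - i + t.length) = r + t.length := by omega
          rw [this]; exact h
      · rintro ⟨j, hp, he⟩
        rw [List.drop_drop] at hp he
        have hassoc : i + (j + t.length) = i + j + t.length := by omega
        rw [hassoc] at he
        have hrj : r ≤ i + j := by
          by_contra hc
          push Not at hc
          exact h5 (i + j) (by omega) hc hp
        apply pvEx_drop _ ts (i + j + t.length - (r + t.length))
        rw [List.drop_drop]
        have : r + t.length + (i + j + t.length - (r + t.length)) = i + j + t.length := by omega
        rw [this]
        exact he

-- ===== VERDICT (by name: the statement is the Claim_ definition above) =====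
theorem compLike_spec : Claim_equal_compLike := by
  intro s1 s2 _hdom
  unfold Spec_compLike compLike compLike_alt
  by_cases h : (PySem.Chars.splitOn s2.toList ['%']).length == 1
  · simp only [h, if_pos]
  · simp only [h, Bool.false_eq_true, if_neg, not_false_iff]
    apply Bool.coe_iff_coe.mp
    rw [pvGoA_iff, pvGoB_iff _ _ 0 (by omega)]
    simp only [List.drop_zero]
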